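-- pv_equiv track=rewrite | github.com/codebyshennan/dsai | docs/scripts/add_after_outcomes.py | insert_after_h1
-- ===== SOURCE A (Python) =====
-- def insert_after_h1(content: str, line: str) -> str:
--     """Insert `line` (with newline) immediately after the first # heading line."""
--     lines = content.splitlines(keepends=True)
--     out: list[str] = []
--     inserted = False
--     for i, ln in enumerate(lines):
--         out.append(ln)
--         if not inserted and ln.startswith("# ") and not ln.startswith("# #"):
--             # Skip if next non-empty is already our line
--             out.append("\n")
--             out.append(line.rstrip() + "\n")
--             inserted = True
--     if not inserted:
--         return content
--     return "".join(out)
-- ===== SOURCE B (Python) =====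
-- def insert_after_h1(content: str, line: str) -> str:
--     """Locate-then-splice: find the first H1 line, then rebuild by slicing."""
--     lines = content.splitlines(keepends=True)
--     idx = next((i for i, ln in enumerate(lines)
--                 if ln.startswith("# ") and not ln.startswith("# #")), None)
--     if idx is None:
--         return content
--     return "".join(lines[:idx + 1] + ["\n", line.rstrip() + "\n"] + lines[idx + 1:])
-- ===== Notes on version B (the rewrite author's own statement) =====
-- stated objective: simpler
-- what changed: Replaces A's fused accumulator loop with an inserted flag by locate-then-splice: find the index of the first H1 line, then build the result once by slicing and joining.
import Mathlib
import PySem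

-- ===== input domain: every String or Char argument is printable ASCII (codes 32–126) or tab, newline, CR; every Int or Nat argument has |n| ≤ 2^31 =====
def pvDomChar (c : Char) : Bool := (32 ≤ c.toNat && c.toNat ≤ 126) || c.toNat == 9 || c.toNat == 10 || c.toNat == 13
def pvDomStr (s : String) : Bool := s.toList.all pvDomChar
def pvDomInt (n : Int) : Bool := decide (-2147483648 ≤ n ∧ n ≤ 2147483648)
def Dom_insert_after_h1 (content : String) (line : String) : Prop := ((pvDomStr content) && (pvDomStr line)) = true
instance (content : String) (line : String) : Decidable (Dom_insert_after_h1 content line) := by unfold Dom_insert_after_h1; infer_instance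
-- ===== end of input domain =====

-- B replaces A's fused accumulator loop (with an `inserted` flag) by locate-then-splice:
-- find the first H1 line's index, then rebuild once by slicing; objective: simpler.

-- splitlines(keepends=True), hand-ported (PySem.Str.splitlines drops the ends):
-- exact on the Dom alphabet, where the only line breaks are '\n', '\r' and '\r\n'.
def pvSplitKeep : List Char → List (List Char)
  | [] => []
  | '\n' :: rest => ['\n'] :: pvSplitKeep rest
  | '\r' :: '\n' :: rest => ['\r', '\n'] :: pvSplitKeep rest
  | '\r' :: rest => ['\r'] :: pvSplitKeep rest
  | c :: rest =>
    match pvSplitKeep rest with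
    | [] => [[c]]
    | l :: ls => (c :: l) :: ls

-- ln.startswith("# ") and not ln.startswith("# #")  (shared: both Pythons use this test verbatim)
def pvIsH1 (ln : List Char) : Bool :=
  PySem.Chars.startswith ln ['#', ' '] && !(PySem.Chars.startswith ln ['#', ' ', '#'])

-- ===== PORT A =====
def pvStepA (line : String) (st : List (List Char) × Bool) (p : Int × List Char) :
    List (List Char) × Bool :=
  let out := st.1 ++ [p.2]
  if !st.2 && pvIsH1 p.2 then
    (out ++ [['\n'], PySem.Chars.rstrip line.toList ++ ['\n']], true)
  else
    (out, st.2)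

def insert_after_h1 (content : String) (line : String) : String :=
  let lines := pvSplitKeep content.toList
  let st := (PySem.List.enumerate lines 0).foldl (pvStepA line) ([], false)
  if !st.2 then content
  else String.ofList (PySem.Chars.join [] st.1)

-- ===== PORT B =====
def insert_after_h1_alt (content : String) (line : String) : String :=
  let lines := pvSplitKeep content.toList
  match lines.findIdx? pvIsH1 with
  | none => content
  | some i =>
      String.ofList (PySem.Chars.join []
        (PySem.List.slice lines none (some ((i : Int) + 1))
          ++ [['\n'], PySem.Chars.rstrip line.toList ++ ['\n']]
          ++ PySem.List.slice lines (some ((i : Int) + 1)) none))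

-- ===== PRECONDITION & SPEC =====
def Spec_insert_after_h1 (content : String) (line : String) (out : String) : Prop := out = insert_after_h1_alt content line
instance (content : String) (line : String) (out : String) : Decidable (Spec_insert_after_h1 content line out) := by unfold Spec_insert_after_h1; infer_instance

-- ===== CLAIM (what is proved, stated in full; the proofs are below) =====
def Claim_equal_insert_after_h1 : Prop := ∀ (content : String) (line : String), Dom_insert_after_h1 content line → Spec_insert_after_h1 content line (insert_after_h1 content line)

-- ===== LEMMAS AND PROOFS =====

-- once inserted, A's loop just appends the remaining lines
theorem pv_foldA_true (line : String) (lines : List (List Char)) (acc : List (List Char))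
    (s : Int) :
    (PySem.List.enumerate lines s).foldl (pvStepA line) (acc, true) = (acc ++ lines, true) := by
  induction lines generalizing acc s with
  | nil => simp [PySem.List.enumerate_nil]
  | cons ln rest ih =>
      simp only [PySem.List.enumerate_cons, List.foldl_cons, pvStepA]
      simp [ih]

-- characterisation of A's loop from a not-yet-inserted state, by the first matching index
theorem pv_foldA_false (line : String) (lines : List (List Char)) (acc : List (List Char))
    (s : Int) :
    (PySem.List.enumerate lines s).foldl (pvStepA line) (acc, false) =
      match lines.findIdx? pvIsH1 with
      | none => (acc ++ lines, false)
      | some i => (acc ++ lines.take (i + 1)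
          ++ [['\n'], PySem.Chars.rstrip line.toList ++ ['\n']] ++ lines.drop (i + 1), true) := by
  induction lines generalizing acc s with
  | nil => simp [PySem.List.enumerate_nil]
  | cons ln rest ih =>
      simp only [PySem.List.enumerate_cons, List.foldl_cons, pvStepA, List.findIdx?_cons]
      by_cases h : pvIsH1 ln
      · simp only [h, Bool.not_false, Bool.true_and, if_pos]
        simp [pv_foldA_true]
      · simp only [h, Bool.false_eq_true, if_neg, not_false_iff, Bool.and_false]
        rw [ih (acc ++ [ln]) (s + 1)]
        cases hfi : rest.findIdx? pvIsH1 with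
        | none => simp
        | some i => simp [List.take_succ_cons, List.drop_succ_cons]

-- ===== VERDICT (by name: the statement is the Claim_ definition above) =====
theorem insert_after_h1_spec : Claim_equal_insert_after_h1 := by
  intro content line _
  unfold Spec_insert_after_h1 insert_after_h1 insert_after_h1_alt
  simp only []
  rw [pv_foldA_false line (pvSplitKeep content.toList) [] 0]
  cases hfi : (pvSplitKeep content.toList).findIdx? pvIsH1 with
  | none => simp
  | some i =>
      have h1 : ((i : Int) + 1) = ((i + 1 : Nat) : Int) := by push_cast; ring
      simp only [List.nil_append]
      rw [h1, PySem.List.slice_to_natCast, PySem.List.slice_from_natCast]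
      simp [List.append_assoc]
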